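-- pv_equiv track=rewrite | github.com/minghong/dynamic_compression | convert_DNA.py | DNAEncode
-- ===== SOURCE A (Python) =====
-- import math
-- from textwrap import wrap
-- import math
-- import math
-- from textwrap import wrap
--
-- def ternary(n):
--     e = n // 3
--     q = n % 3
--     if n == 0:
--         return '0'
--     elif e == 0:
--         return str(q)
--     else:
--         return ternary(e) + str(q)
--
-- def bin2DNAcode0(num):
--     codes = {
--         'A' : 'C',
--         'C' : 'G',
--         'G' : 'T',
--         'T' : 'A'
--     }
--     return codes.get(num)
--
-- def bin2DNAcode1(num):
--     codes = {
--         'A' : 'G',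
--         'C' : 'T',
--         'G' : 'A',
--         'T' : 'C'
--     }
--     return codes.get(num)
--
-- def bin2DNAcode2(num):
--     codes = {
--         'A' : 'T',
--         'C' : 'A',
--         'G' : 'C',
--         'T' : 'G'
--     }
--     return codes.get(num)
--
-- def bin2Code(num, DNAcode):
--     codes = {
--         '0' : bin2DNAcode0(DNAcode),
--         '1' : bin2DNAcode1(DNAcode),
--         '2' : bin2DNAcode2(DNAcode)
--     }
--     return codes.get(num)
--
-- def DNAEncode(binSeq, dna_length):
--     n = 3
--     x1 = ''
--     for i in range(math.ceil(len(binSeq) / n)):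
--         temp = binSeq[n * (i + 1) - n:n * (i + 1)]
--         b = int(temp, 2)
--         x1 = x1 + ternary(b).zfill(2)
--     y1 = ['A']
--     for i in range(1, len(x1)):
--         d1 = x1[i]
--         d2 = y1[i - 1]
--         y1.append(bin2Code(d1, d2))
--     y1 = ''.join(y1)
--     res = len(y1) % dna_length
--     add1 = 'ATCG'
--     add2 = 'ATCG'
--     for i in range(math.ceil((dna_length - res) / 4)):
--         add1 = add1 + add2
--     y1 = y1 + add1[0: dna_length - res]
--     encodeDNA = wrap(''.join(y1), dna_length)
--     return encodeDNA, res
-- ===== SOURCE B (Python) =====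
-- def DNAEncode(binSeq, dna_length):
--     # Finite-state transducer: each 3-bit chunk value (0..7) maps, via a hard-coded
--     # table keyed by the last emitted base, directly to the next two bases; the first
--     # chunk has its own table because its leading digit is discarded.
--     FIRST = ['AC', 'AG', 'AT', 'AC', 'AG', 'AT', 'AC', 'AG']
--     STEP = {
--         'A': ['CG', 'CT', 'CA', 'GT', 'GA', 'GC', 'TA', 'TC'],
--         'C': ['GT', 'GA', 'GC', 'TA', 'TC', 'TG', 'AC', 'AG'],
--         'G': ['TA', 'TC', 'TG', 'AC', 'AG', 'AT', 'CG', 'CT'],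
--         'T': ['AC', 'AG', 'AT', 'CG', 'CT', 'CA', 'GT', 'GA'],
--     }
--     y = 'A'
--     first = True
--     for pos in range(0, len(binSeq), 3):
--         b = int(binSeq[pos:pos + 3], 2)
--         if first:
--             y = FIRST[b]
--             first = False
--         else:
--             y += STEP[y[-1]][b]
--     res = len(y) % dna_length
--     pad = dna_length - res
--     y += ('ATCG' * ((pad + 3) // 4 + 1))[:pad]
--     return [y[i:i + dna_length] for i in range(0, len(y), dna_length)], res
-- ===== Notes on version B (the rewrite author's own statement) =====
-- stated objective: alternative
-- what changed: B replaces A's recursive ternary conversion, zfill and per-digit chained three-dict cipher by a finite-state transducer: a hard-coded 4x8 table keyed by the last emitted base maps each 3-bit chunk value directly to the next two bases (a separate 8-entry table handles the first chunk, whose leading digit A discards), so no ternary digits or intermediate digit string exist at runtime; padding repeats 'ATCG' once and slices, and chunking is a slice comprehension instead of textwrap.wrap.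
-- outside the precondition, e.g. on DNAEncode('1_0', 2): A returns (['AT', 'AT'], 0), B returns (['AT', 'AT'], 0)
import Mathlib
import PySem

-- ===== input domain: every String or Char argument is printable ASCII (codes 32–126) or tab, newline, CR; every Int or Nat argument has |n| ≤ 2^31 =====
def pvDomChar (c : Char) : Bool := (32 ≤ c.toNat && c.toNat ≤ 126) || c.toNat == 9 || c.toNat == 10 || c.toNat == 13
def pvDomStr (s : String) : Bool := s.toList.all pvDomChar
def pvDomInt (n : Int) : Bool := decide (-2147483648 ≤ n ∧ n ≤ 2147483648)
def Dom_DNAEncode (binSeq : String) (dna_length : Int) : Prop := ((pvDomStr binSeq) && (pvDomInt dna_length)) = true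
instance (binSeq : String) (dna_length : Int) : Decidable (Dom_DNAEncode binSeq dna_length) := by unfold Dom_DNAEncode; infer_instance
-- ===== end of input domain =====

-- B replaces the recursive ternary/zfill digit construction and the per-digit chained dict cipher by a
-- finite-state transducer with hard-coded tables mapping (last base, 3-bit chunk value) to two bases
-- (objective: alternative; same asymptotic cost).

-- ===== PORT A =====
-- ternary(n): the recursion runs on n//3; the fuel n.natAbs+1 suffices for every n ≥ 0 (the only values
-- reached under Pre_); Python diverges (RecursionError) for n < 0, which Pre_ excludes.
def pvTernaryFuel : Nat → Int → List Char
  | 0, _ => []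
  | fuel + 1, n =>
    let e := PySem.Int.floordiv n 3
    let q := PySem.Int.mod n 3
    if n = 0 then ['0']
    else if e = 0 then PySem.Int.toChars q
    else pvTernaryFuel fuel e ++ PySem.Int.toChars q

def pvTernary (n : Int) : List Char := pvTernaryFuel (n.natAbs + 1) n

def bin2DNAcode0 (num : String) : Option String :=
  (PySem.Dict.ofList [("A", "C"), ("C", "G"), ("G", "T"), ("T", "A")]).get? num

def bin2DNAcode1 (num : String) : Option String :=
  (PySem.Dict.ofList [("A", "G"), ("C", "T"), ("G", "A"), ("T", "C")]).get? num

def bin2DNAcode2 (num : String) : Option String :=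
  (PySem.Dict.ofList [("A", "T"), ("C", "A"), ("G", "C"), ("T", "G")]).get? num

-- codes.get(num) on a dict whose values are already Option String: a missing key and a stored None both give None
def bin2Code (num : String) (DNAcode : String) : Option String :=
  ((PySem.Dict.ofList [("0", bin2DNAcode0 DNAcode), ("1", bin2DNAcode1 DNAcode),
                       ("2", bin2DNAcode2 DNAcode)]).get? num).getD none

-- textwrap.wrap(text, width): exact for whitespace-free text and width ≥ 1 — all that A reaches under Pre_
def pvWrap : Nat → List Char → Nat → List String
  | _, [], _ => []
  | 0, _, _ => []
  | fuel + 1, cs, w => String.ofList (cs.take w) :: pvWrap fuel (cs.drop w) w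

def DNAEncode (binSeq : String) (dna_length : Int) : List String × Int :=
  let bs := binSeq.toList
  let n : Int := 3
  -- math.ceil(len(binSeq) / n) ported as exact ceiling division (the float quotient is exact at these sizes)
  let x1 : List Char :=
    (PySem.List.pyRange 0 (-(PySem.Int.floordiv (-(PySem.List.len bs)) n)) 1).foldl
      (fun x1 i =>
        let temp := PySem.List.slice bs (some (n * (i + 1) - n)) (some (n * (i + 1)))
        let b := (PySem.Int.ofCharsBase? temp 2).getD 0   -- int(temp, 2); none = ValueError, outside Pre_
        x1 ++ PySem.Chars.zfill (pvTernary b) 2) []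
  let y1 : List String :=
    (PySem.List.pyRange 1 (PySem.List.len x1) 1).foldl
      (fun y1 i =>
        let d1 := String.ofList [PySem.List.pyGetD x1 i 'x']   -- x1[i]: the index is always in range here
        let d2 := PySem.List.pyGetD y1 (i - 1) ""          -- y1[i-1]: the index is always in range here
        y1 ++ [(bin2Code d1 d2).getD ""])                   -- never none under Pre_ (join would raise TypeError)
      ["A"]
  let y : List Char := PySem.Chars.join [] (y1.map String.toList)
  let res := PySem.Int.mod (PySem.List.len y) dna_length    -- dna_length = 0 (ZeroDivisionError) is outside Pre_
  let add2 : List Char := ['A', 'T', 'C', 'G']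
  -- math.ceil((dna_length - res) / 4) ported as exact ceiling division
  let add1 : List Char :=
    (PySem.List.pyRange 0 (-(PySem.Int.floordiv (-(dna_length - res)) 4)) 1).foldl
      (fun a _ => a ++ add2) ['A', 'T', 'C', 'G']
  let y2 := y ++ PySem.List.slice add1 (some 0) (some (dna_length - res))
  (pvWrap y2.length y2 dna_length.toNat, res)

-- ===== PORT B =====
def pvFIRST : List String := ["AC", "AG", "AT", "AC", "AG", "AT", "AC", "AG"]

def pvSTEP : PySem.Dict String (List String) :=
  PySem.Dict.ofList
    [("A", ["CG", "CT", "CA", "GT", "GA", "GC", "TA", "TC"]),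
     ("C", ["GT", "GA", "GC", "TA", "TC", "TG", "AC", "AG"]),
     ("G", ["TA", "TC", "TG", "AC", "AG", "AT", "CG", "CT"]),
     ("T", ["AC", "AG", "AT", "CG", "CT", "CA", "GT", "GA"])]

def DNAEncode_alt (binSeq : String) (dna_length : Int) : List String × Int :=
  let bs := binSeq.toList
  let st :=
    (PySem.List.pyRange 0 (PySem.List.len bs) 3).foldl
      (fun (st : List Char × Bool) pos =>
        let b := (PySem.Int.ofCharsBase? (PySem.List.slice bs (some pos) (some (pos + 3))) 2).getD 0
          -- int(binSeq[pos:pos+3], 2); none = ValueError, outside Pre_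
        if st.2 then
          ((PySem.List.pyGetD pvFIRST b "").toList, false)          -- FIRST[b]: 0 ≤ b < 8 here
        else
          (st.1 ++ (PySem.List.pyGetD
              ((pvSTEP.get? (String.ofList [PySem.List.pyGetD st.1 (-1) 'x'])).getD []) b "").toList,
           false))                                                  -- STEP[y[-1]][b]: key and index always hit
      (['A'], true)
  let y := st.1
  let res := PySem.Int.mod (PySem.List.len y) dna_length    -- dna_length = 0 is outside Pre_
  let pad := dna_length - res
  let y2 := y ++ PySem.List.slice
      (PySem.List.pyRepeat ['A', 'T', 'C', 'G'] (PySem.Int.floordiv (pad + 3) 4 + 1)) none (some pad)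
  ((PySem.List.pyRange 0 (PySem.List.len y2) dna_length).map
      (fun i => String.ofList (PySem.List.slice y2 (some i) (some (i + dna_length)))), res)

-- ===== PRECONDITION & SPEC =====
-- Pre_ restricts binSeq to '0'/'1' characters — the function's natural binary domain: on other strings A
-- raises ValueError from int(·, 2) (or RecursionError when a chunk parses negative), except for Python
-- int-literal quirks (spaces, '+', '_' inside a chunk, e.g. '1_0') on which A and B agree but which are
-- excluded together with the rest — and requires dna_length ≥ 1: A raises ZeroDivisionError at 0 and
-- ValueError from textwrap.wrap at negative widths.
def Pre_DNAEncode (binSeq : String) (dna_length : Int) : Prop :=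
  binSeq.toList.all (fun c => c == '0' || c == '1') = true ∧ 1 ≤ dna_length
instance (binSeq : String) (dna_length : Int) : Decidable (Pre_DNAEncode binSeq dna_length) := by
  unfold Pre_DNAEncode; infer_instance

def pvWitness_DNAEncode : String × Int := ("101101", 4)

def Spec_DNAEncode (binSeq : String) (dna_length : Int) (out : List String × Int) : Prop := out = DNAEncode_alt binSeq dna_length
instance (binSeq : String) (dna_length : Int) (out : List String × Int) : Decidable (Spec_DNAEncode binSeq dna_length out) := by unfold Spec_DNAEncode; infer_instance

-- ===== CLAIM (what is proved, stated in full; the proofs are below) =====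
def Claim_equal_DNAEncode : Prop := ∀ (binSeq : String) (dna_length : Int), Dom_DNAEncode binSeq dna_length → Pre_DNAEncode binSeq dna_length → Spec_DNAEncode binSeq dna_length (DNAEncode binSeq dna_length)

-- ===== LEMMAS AND PROOFS =====

-- the ternary digit d ∈ {0,1,2} as the character A's x1 string holds
def digitChar (d : Int) : Char := if d = 0 then '0' else if d = 1 then '1' else '2'
-- 'ACGT'[i] for 0 ≤ i < 4
def baseChar (i : Int) : Char := if i = 0 then 'A' else if i = 1 then 'C' else if i = 2 then 'G' else 'T'
-- int(binSeq[3k:3k+3], 2), the value of the k-th 3-bit chunk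
def pvBval (bs : List Char) (k : Nat) : Int :=
  (PySem.Int.ofCharsBase? ((bs.drop (3 * k)).take 3) 2).getD 0

theorem pv_chunk_parse (cs : List Char) (h1 : cs ≠ []) (h3 : cs.length ≤ 3)
    (hc : ∀ c ∈ cs, c = '0' ∨ c = '1') :
    ∃ b : Int, PySem.Int.ofCharsBase? cs 2 = some b ∧ 0 ≤ b ∧ b < 8 := by
  match cs, h1 with
  | [a], _ =>
    rcases hc a (by simp) with h | h <;> subst h
    · exact ⟨0, by decide⟩
    · exact ⟨1, by decide⟩
  | [a, b], _ =>
    rcases hc a (by simp) with h | h <;> rcases hc b (by simp) with h' | h' <;> subst h <;> subst h' <;>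
      first
      | exact ⟨0, by decide⟩ | exact ⟨1, by decide⟩ | exact ⟨2, by decide⟩ | exact ⟨3, by decide⟩
  | [a, b, c], _ =>
    rcases hc a (by simp) with h | h <;> rcases hc b (by simp) with h' | h' <;>
      rcases hc c (by simp) with h'' | h'' <;> subst h <;> subst h' <;> subst h'' <;>
      first
      | exact ⟨0, by decide⟩ | exact ⟨1, by decide⟩ | exact ⟨2, by decide⟩ | exact ⟨3, by decide⟩
      | exact ⟨4, by decide⟩ | exact ⟨5, by decide⟩ | exact ⟨6, by decide⟩ | exact ⟨7, by decide⟩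
  | a :: b :: c :: d :: tl, _ => (simp at h3; omega)

theorem pv_tern_eq (b : Int) (h0 : 0 ≤ b) (h8 : b < 8) :
    PySem.Chars.zfill (pvTernary b) 2 =
      [digitChar (PySem.Int.floordiv b 3), digitChar (PySem.Int.mod b 3)] := by
  interval_cases b <;> decide

theorem pv_bases_at (i : Int) (h0 : 0 ≤ i) (h4 : i < 4) :
    PySem.List.pyGetD ['A', 'C', 'G', 'T'] i 'x' = baseChar i := by
  interval_cases i <;> decide

theorem pv_bin2Code_eq (d i : Int) (hd0 : 0 ≤ d) (hd : d < 3) (hi0 : 0 ≤ i) (hi : i < 4) :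
    bin2Code (String.ofList [digitChar d]) (String.ofList [baseChar i]) =
      some (String.ofList [baseChar (PySem.Int.mod (i + d + 1) 4)]) := by
  interval_cases d <;> interval_cases i <;> decide

-- B's FIRST table is the first transducer step (the leading ternary digit discarded)
theorem pv_first_table (b : Int) (hb0 : 0 ≤ b) (hb : b < 8) :
    (PySem.List.pyGetD pvFIRST b "").toList
      = ['A', baseChar (PySem.Int.mod (0 + PySem.Int.mod b 3 + 1) 4)] := by
  interval_cases b <;> decide

-- B's STEP table is two consecutive running-index steps from state s on chunk value b
theorem pv_step_table (s b : Int) (hs0 : 0 ≤ s) (hs : s < 4) (hb0 : 0 ≤ b) (hb : b < 8) :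
    (PySem.List.pyGetD ((pvSTEP.get? (String.ofList [baseChar s])).getD []) b "").toList
      = [baseChar (PySem.Int.mod (s + PySem.Int.floordiv b 3 + 1) 4),
         baseChar (PySem.Int.mod (PySem.Int.mod (s + PySem.Int.floordiv b 3 + 1) 4
                     + PySem.Int.mod b 3 + 1) 4)] := by
  interval_cases s <;> interval_cases b <;> decide

-- each well-formed 3-bit chunk parses to a value in [0, 8)
theorem pv_bval_bounds (bs : List Char) (hbin : ∀ c ∈ bs, c = '0' ∨ c = '1') (k : Nat)
    (hk : 3 * k < bs.length) : 0 ≤ pvBval bs k ∧ pvBval bs k < 8 := by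
  have hchunk : ((bs.drop (3 * k)).take 3).length = min 3 (bs.length - 3 * k) := by
    simp [List.length_take]
  obtain ⟨b, hb, hb0, hb8⟩ := pv_chunk_parse ((bs.drop (3 * k)).take 3)
    (by intro hnil; rw [hnil] at hchunk; simp at hchunk; omega)
    (by omega)
    (fun c hc => hbin c (List.mem_of_mem_drop (List.mem_of_mem_take hc)))
  simp [pvBval, hb]; omega

-- the step-3 range as a mapped Nat range of ceil(L/3) chunk indices
theorem pv_range3 (L : Nat) :
    PySem.List.pyRange 0 (L : Int) 3 =
      (List.range (-(PySem.Int.floordiv (-(L : Int)) 3)).toNat).map (fun k => ((3 * k : Nat) : Int)) := by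
  rw [PySem.List.pyRange_of_pos 0 L (by norm_num)]
  have h1 : PySem.Int.floordiv (-(L : Int)) 3 = (-(L : Int)) / 3 := PySem.Int.floordiv_eq_ediv_of_pos (by norm_num)
  rw [h1]
  have h2 : (if (0:Int) < L then (((L:Int) - 0 + 3 - 1) / 3).toNat else 0) = (-(-(L:Int) / 3)).toNat := by
    split <;> omega
  rw [h2]
  exact List.map_congr_left (fun k _ => by push_cast; ring)

-- A's chunk loop output is the ternary digit list rendered as characters, and every digit is in {0,1,2}
theorem pv_digits (bs : List Char) (hbin : ∀ c ∈ bs, c = '0' ∨ c = '1') :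
    ∀ ks : List Nat, (∀ k ∈ ks, 3 * k < bs.length) →
      ks.flatMap (fun k => PySem.Chars.zfill (pvTernary (pvBval bs k)) 2)
        = (ks.flatMap (fun k =>
            [PySem.Int.floordiv (pvBval bs k) 3, PySem.Int.mod (pvBval bs k) 3])).map digitChar
      ∧ ∀ d ∈ ks.flatMap (fun k =>
            [PySem.Int.floordiv (pvBval bs k) 3, PySem.Int.mod (pvBval bs k) 3]), 0 ≤ d ∧ d < 3 := by
  intro ks
  induction ks with
  | nil => intro _; exact ⟨rfl, by simp⟩
  | cons k ks ih =>
    intro hk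
    obtain ⟨ih1, ih2⟩ := ih (fun j hj => hk j (by simp [hj]))
    have hklen : 3 * k < bs.length := hk k (by simp)
    obtain ⟨hb0, hb8⟩ := pv_bval_bounds bs hbin k hklen
    have hdivb : PySem.Int.floordiv (pvBval bs k) 3 = (pvBval bs k) / 3 :=
      PySem.Int.floordiv_eq_ediv_of_pos (by omega)
    constructor
    · simp only [List.flatMap_cons, List.map_append]
      rw [pv_tern_eq (pvBval bs k) hb0 hb8, ih1]
      simp
    · intro d hd
      rw [List.flatMap_cons, List.mem_append] at hd
      rcases hd with h | h
      · have h2 : d = PySem.Int.floordiv (pvBval bs k) 3 ∨ d = PySem.Int.mod (pvBval bs k) 3 := by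
          simpa using h
        rcases h2 with h' | h' <;> rw [h']
        · rw [hdivb]; omega
        · exact ⟨PySem.Int.mod_nonneg _ (by omega), PySem.Int.mod_lt _ (by omega)⟩
      · exact ih2 d h

-- the cipher loop: A's indexed dict-lookup fold equals the running-index fold over the digits
theorem pv_cipher (ds : List Int) :
    ∀ (pre : List Int) (idx : Int) (out : List Char),
      (∀ d ∈ ds, 0 ≤ d ∧ d < 3) → 0 ≤ idx → idx < 4 →
      1 ≤ pre.length → out.length = pre.length →
      out.getLast? = some (baseChar idx) →
      (PySem.List.pyRange (pre.length : Int) (PySem.List.len ((pre ++ ds).map digitChar)) 1).foldl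
          (fun y1 i =>
            y1 ++ [(bin2Code (String.ofList [PySem.List.pyGetD ((pre ++ ds).map digitChar) i 'x'])
                      (PySem.List.pyGetD y1 (i - 1) "")).getD ""])
          (out.map (fun c => String.ofList [c]))
        = ((ds.foldl (fun (st : Int × List Char) d =>
              (PySem.Int.mod (st.1 + d + 1) 4,
               st.2 ++ [PySem.List.pyGetD ['A', 'C', 'G', 'T'] (PySem.Int.mod (st.1 + d + 1) 4) 'x']))
            (idx, out)).2).map (fun c => String.ofList [c]) := by
  induction ds with
  | nil =>
    intro pre idx out _ _ _ _ _ _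
    rw [List.append_nil, PySem.List.len_eq, List.length_map,
      PySem.List.pyRange_one_eq_nil (by omega)]
    rfl
  | cons d ds' ih =>
    intro pre idx out hd hi0 hi4 hp1 holen hlast
    have hbounds := hd d (by simp)
    have hlt : (pre.length : Int) < PySem.List.len ((pre ++ d :: ds').map digitChar) := by
      rw [PySem.List.len_eq, List.length_map, List.length_append, List.length_cons]
      push_cast; omega
    rw [PySem.List.pyRange_one_cons hlt, List.foldl_cons]
    have hidx0 : 0 ≤ PySem.Int.mod (idx + d + 1) 4 := PySem.Int.mod_nonneg _ (by omega)
    have hidx4 : PySem.Int.mod (idx + d + 1) 4 < 4 := PySem.Int.mod_lt _ (by omega)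
    have hd1 : PySem.List.pyGetD ((pre ++ d :: ds').map digitChar) (pre.length : Int) 'x'
        = digitChar d := by
      rw [PySem.List.pyGetD_natCast, List.getD_eq_getElem?_getD, List.map_append]
      rw [List.getElem?_append_right (by simp)]
      simp
    have hd2 : PySem.List.pyGetD (out.map (fun c => String.ofList [c])) ((pre.length : Int) - 1) ""
        = String.ofList [baseChar idx] := by
      have hc : ((pre.length : Int) - 1) = ((pre.length - 1 : Nat) : Int) := by omega
      rw [hc, PySem.List.pyGetD_natCast, List.getD_eq_getElem?_getD, List.getElem?_map]
      rw [List.getLast?_eq_getElem?, holen] at hlast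
      rw [hlast]
      rfl
    have hstep : (out.map (fun c => String.ofList [c])) ++
          [(bin2Code (String.ofList [PySem.List.pyGetD ((pre ++ d :: ds').map digitChar) (pre.length : Int) 'x'])
              (PySem.List.pyGetD (out.map (fun c => String.ofList [c])) ((pre.length : Int) - 1) "")).getD ""]
        = (out ++ [baseChar (PySem.Int.mod (idx + d + 1) 4)]).map (fun c => String.ofList [c]) := by
      rw [hd1, hd2, pv_bin2Code_eq d idx hbounds.1 hbounds.2 hi0 hi4]
      simp
    rw [hstep]
    have hih := ih (pre ++ [d]) (PySem.Int.mod (idx + d + 1) 4)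
      (out ++ [baseChar (PySem.Int.mod (idx + d + 1) 4)])
      (fun e he => hd e (by simp [he])) hidx0 hidx4
      (by simp) (by simp [holen]) List.getLast?_concat
    rw [List.append_assoc] at hih
    simp only [List.cons_append, List.nil_append, List.length_append, List.length_cons,
      List.length_nil, Nat.cast_add, Nat.cast_one, zero_add] at hih
    rw [List.foldl_cons, pv_bases_at _ hidx0 hidx4]
    exact hih

-- B's transducer loop (after the first chunk) equals the running-index fold over the two digits per chunk
theorem pv_fsm_tail (bval : Nat → Int) :
    ∀ (ks : List Nat) (idx : Int) (out : List Char),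
      (∀ k ∈ ks, 0 ≤ bval k ∧ bval k < 8) → 0 ≤ idx → idx < 4 →
      out.getLast? = some (baseChar idx) →
      ks.foldl (fun (st : List Char × Bool) k =>
          if st.2 then ((PySem.List.pyGetD pvFIRST (bval k) "").toList, false)
          else (st.1 ++ (PySem.List.pyGetD
              ((pvSTEP.get? (String.ofList [PySem.List.pyGetD st.1 (-1) 'x'])).getD []) (bval k) "").toList,
            false))
        (out, false)
      = (((ks.flatMap (fun k => [PySem.Int.floordiv (bval k) 3, PySem.Int.mod (bval k) 3])).foldl
            (fun (st : Int × List Char) d =>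
              (PySem.Int.mod (st.1 + d + 1) 4,
               st.2 ++ [PySem.List.pyGetD ['A', 'C', 'G', 'T'] (PySem.Int.mod (st.1 + d + 1) 4) 'x']))
            (idx, out)).2, false) := by
  intro ks
  induction ks with
  | nil => intro idx out _ _ _ _; rfl
  | cons k ks ih =>
    intro idx out hb hi0 hi4 hlast
    have hbk := hb k (by simp)
    have hones : out ≠ [] := by intro h; rw [h] at hlast; simp at hlast
    have hd1 : PySem.Int.floordiv (bval k) 3 = bval k / 3 :=
      PySem.Int.floordiv_eq_ediv_of_pos (by omega)
    have hd1b : 0 ≤ PySem.Int.floordiv (bval k) 3 ∧ PySem.Int.floordiv (bval k) 3 < 3 := by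
      rw [hd1]; omega
    have hd2b : 0 ≤ PySem.Int.mod (bval k) 3 ∧ PySem.Int.mod (bval k) 3 < 3 :=
      ⟨PySem.Int.mod_nonneg _ (by omega), PySem.Int.mod_lt _ (by omega)⟩
    set m := PySem.Int.mod (idx + PySem.Int.floordiv (bval k) 3 + 1) 4 with hm
    set t := PySem.Int.mod (m + PySem.Int.mod (bval k) 3 + 1) 4 with ht
    have hm0 : 0 ≤ m := PySem.Int.mod_nonneg _ (by omega)
    have hm4 : m < 4 := PySem.Int.mod_lt _ (by omega)
    have ht0 : 0 ≤ t := PySem.Int.mod_nonneg _ (by omega)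
    have ht4 : t < 4 := PySem.Int.mod_lt _ (by omega)
    have hlastc : PySem.List.pyGetD out (-1) 'x' = baseChar idx := by
      rw [PySem.List.pyGetD_neg_one out 'x' hones]
      rw [List.getLast?_eq_some_getLast hones] at hlast
      exact Option.some_injective _ hlast
    have hBstep : (if false = true then ((PySem.List.pyGetD pvFIRST (bval k) "").toList, false)
          else (out ++ (PySem.List.pyGetD
              ((pvSTEP.get? (String.ofList [PySem.List.pyGetD out (-1) 'x'])).getD []) (bval k) "").toList,
            false))
        = (out ++ [baseChar m, baseChar t], false) := by
      rw [if_neg (by simp), hlastc,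
        pv_step_table idx (bval k) hi0 hi4 hbk.1 hbk.2, ← hm, ← ht]
    have hFstep : ∀ (st : Int × List Char),
        [PySem.Int.floordiv (bval k) 3, PySem.Int.mod (bval k) 3].foldl
          (fun (st : Int × List Char) d =>
            (PySem.Int.mod (st.1 + d + 1) 4,
             st.2 ++ [PySem.List.pyGetD ['A', 'C', 'G', 'T'] (PySem.Int.mod (st.1 + d + 1) 4) 'x']))
          (idx, out)
        = (t, out ++ [baseChar m, baseChar t]) := by
      intro _
      simp only [List.foldl_cons, List.foldl_nil, ← hm, ← ht,
        pv_bases_at m hm0 hm4, pv_bases_at t ht0 ht4]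
      simp
    rw [List.foldl_cons, hBstep, List.flatMap_cons, List.foldl_append, hFstep (idx, out)]
    exact ih t (out ++ [baseChar m, baseChar t]) (fun j hj => hb j (by simp [hj])) ht0 ht4
      (by rw [show out ++ [baseChar m, baseChar t] = (out ++ [baseChar m]) ++ [baseChar t] by simp]
          exact List.getLast?_concat)

-- A's repeated-append padding string equals B's pyRepeat
theorem pv_pad_eq (p : Int) (hp : 1 ≤ p) :
    (PySem.List.pyRange 0 (-(PySem.Int.floordiv (-p) 4)) 1).foldl
        (fun (a : List Char) _ => a ++ ['A', 'T', 'C', 'G']) ['A', 'T', 'C', 'G']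
      = PySem.List.pyRepeat ['A', 'T', 'C', 'G'] (PySem.Int.floordiv (p + 3) 4 + 1) := by
  rw [PySem.List.foldl_append_eq_flatMap (g := fun _ => ['A', 'T', 'C', 'G'])]
  have h1 : PySem.Int.floordiv (-p) 4 = (-p) / 4 := PySem.Int.floordiv_eq_ediv_of_pos (by omega)
  have h2 : PySem.Int.floordiv (p + 3) 4 = (p + 3) / 4 := PySem.Int.floordiv_eq_ediv_of_pos (by omega)
  rw [h1, h2]
  have h3 : -((-p) / 4) = (p + 3) / 4 := by omega
  rw [h3]
  have h4 : ∀ (l : List Int), l.flatMap (fun _ => ['A','T','C','G'])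
      = (List.replicate l.length (['A','T','C','G'] : List Char)).flatten := by
    intro l
    induction l with
    | nil => rfl
    | cons h t ih => simp [List.flatMap, List.replicate_succ]
  rw [h4, PySem.List.length_pyRange_one]
  simp only [PySem.List.pyRepeat]
  have h5 : ((p + 3) / 4 + 1).toNat = ((p + 3) / 4 - 0).toNat + 1 := by omega
  rw [h5, List.replicate_succ, List.flatten_cons]

theorem pvWrap_fuel (w : Nat) (hw : 1 ≤ w) :
    ∀ (f1 f2 : Nat) (cs : List Char), cs.length ≤ f1 → cs.length ≤ f2 →
      pvWrap f1 cs w = pvWrap f2 cs w := by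
  intro f1
  induction f1 with
  | zero =>
    intro f2 cs h1 _
    rcases cs with _ | ⟨c, t⟩
    · cases f2 <;> rfl
    · simp at h1
  | succ f1 ih =>
    intro f2 cs h1 h2
    rcases cs with _ | ⟨c, t⟩
    · cases f2 <;> rfl
    · rcases f2 with _ | f2
      · simp at h2
      · show String.ofList _ :: pvWrap f1 _ w = String.ofList _ :: pvWrap f2 _ w
        congr 1
        exact ih f2 ((c :: t).drop w) (by simp at h1 ⊢; omega) (by simp at h2 ⊢; omega)

theorem pv_slice_shift (cs : List Char) (w a : Int) (hw : 1 ≤ w) (ha : 0 ≤ a) :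
    PySem.List.slice cs (some (w + a)) (some (w + a + w)) =
      PySem.List.slice (cs.drop w.toNat) (some a) (some (a + w)) := by
  rw [PySem.List.slice_toNat _ (by omega) (by omega), PySem.List.slice_toNat _ (by omega) (by omega),
    List.drop_drop]
  have h1 : w.toNat + a.toNat = (w + a).toNat := by omega
  rw [h1]
  congr 1
  omega

-- B's slice comprehension equals A's wrap chunker
theorem pv_chunks_eq (w : Int) (hw : 1 ≤ w) :
    ∀ cs : List Char,
      (PySem.List.pyRange 0 (PySem.List.len cs) w).map
          (fun i => String.ofList (PySem.List.slice cs (some i) (some (i + w))))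
        = pvWrap cs.length cs w.toNat := by
  have main : ∀ (N : Nat) (cs : List Char), cs.length ≤ N →
      (PySem.List.pyRange 0 (PySem.List.len cs) w).map
          (fun i => String.ofList (PySem.List.slice cs (some i) (some (i + w))))
        = pvWrap cs.length cs w.toNat := by
    intro N
    induction N with
    | zero =>
      intro cs h
      rcases cs with _ | ⟨c, t⟩
      · rw [show PySem.List.len ([] : List Char) = (0 : Int) from rfl,
          PySem.List.pyRange_of_pos 0 0 (by omega)]
        simp [pvWrap]
      · simp at h
    | succ N ih =>
      intro cs hlen
      rcases cs with _ | ⟨c, t⟩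
      · rw [show PySem.List.len ([] : List Char) = (0 : Int) from rfl,
          PySem.List.pyRange_of_pos 0 0 (by omega)]
        simp [pvWrap]
      · have hL : 1 ≤ (c :: t).length := by simp
        rw [PySem.List.len_eq, PySem.List.pyRange_of_pos 0 ((c :: t).length : Int) (by omega)]
        simp only [sub_zero]
        have hq1 : 1 ≤ (((c :: t).length : Int) + w - 1) / w := by
          rw [Int.le_ediv_iff_mul_le (by omega)]
          have : (1 : Int) ≤ ((c :: t).length : Int) := by exact_mod_cast hL
          omega
        have hm : (if (0:Int) < ((c :: t).length : Int) then ((((c :: t).length : Int) + w - 1) / w).toNat else 0)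
            = (((((c :: t).length : Int) + w - 1) / w).toNat - 1) + 1 := by
          rw [if_pos (by exact_mod_cast hL)]
          omega
        rw [hm, List.range_succ_eq_map, List.map_map, List.map_cons, List.map_map]
        have hih := ih ((c :: t).drop w.toNat)
          (by simp only [List.length_drop, List.length_cons] at hlen ⊢; omega)
        have hfuel : pvWrap t.length ((c :: t).drop w.toNat) w.toNat
            = pvWrap ((c :: t).drop w.toNat).length ((c :: t).drop w.toNat) w.toNat :=
          pvWrap_fuel w.toNat (by omega) _ _ _
            (by simp only [List.length_drop, List.length_cons]; omega) le_rfl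
        show _ = String.ofList ((c :: t).take w.toNat) :: pvWrap t.length ((c :: t).drop w.toNat) w.toNat
        rw [hfuel]
        congr 1
        · show String.ofList (PySem.List.slice (c :: t) (some ((0:Int) + w * ((0:Nat) : Int))) (some ((0:Int) + w * ((0:Nat) : Int) + w))) = _
          have h0 : (0:Int) + w * ((0:Nat) : Int) = 0 := by simp
          rw [h0, PySem.List.slice_toNat _ (by omega) (by omega)]
          simp
        · rw [PySem.List.len_eq, PySem.List.pyRange_of_pos 0 (((c :: t).drop w.toNat).length : Int) (by omega)] at hih
          simp only [sub_zero] at hih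
          rw [← hih, List.map_map]
          have hsize : (if (0:Int) < (((c :: t).drop w.toNat).length : Int)
                then (((((c :: t).drop w.toNat).length : Int) + w - 1) / w).toNat else 0)
              = ((((c :: t).length : Int) + w - 1) / w).toNat - 1 := by
            set L := (c :: t).length with hLdef
            have hdl : ((c :: t).drop w.toNat).length = L - w.toNat := by rw [hLdef]; simp
            rw [hdl]
            by_cases hsm : L ≤ w.toNat
            · rw [if_neg (by omega)]
              have hlt : ((L : Int) + w - 1) / w < 2 := by
                rw [Int.ediv_lt_iff_lt_mul (by omega)]
                have : (L : Int) ≤ w := by omega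
                omega
              omega
            · have hgt : w.toNat < L := by omega
              rw [if_pos (by omega)]
              have hcast : ((L - w.toNat : Nat) : Int) = (L : Int) - w := by omega
              rw [hcast]
              have e1 : (L : Int) + w - 1 = ((L : Int) - 1 - w) + 2 * w := by ring
              have e2 : (L : Int) - w + w - 1 = ((L : Int) - 1 - w) + 1 * w := by ring
              rw [e1, e2, Int.add_mul_ediv_right _ _ (by omega : w ≠ 0),
                Int.add_mul_ediv_right _ _ (by omega : w ≠ 0)]
              have hnn : 0 ≤ ((L : Int) - 1 - w) / w :=
                Int.ediv_nonneg (by omega) (by omega)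
              omega
          rw [hsize]
          refine List.map_congr_left ?_
          intro k _
          show String.ofList (PySem.List.slice (c :: t) (some ((0:Int) + w * ((k + 1 : Nat) : Int))) _) = _
          have ha : (0:Int) + w * ((k + 1 : Nat) : Int) = w + w * (k : Nat) := by push_cast; ring
          have hb : (0:Int) + w * ((k + 1 : Nat) : Int) + w = (w + w * (k : Nat)) + w := by push_cast; ring
          rw [ha, hb, pv_slice_shift _ _ _ hw (by positivity)]
          have hc : (0:Int) + w * ((k : Nat) : Int) = w * (k : Nat) := by ring
          simp only [Function.comp_apply, hc]
  intro cs; exact main cs.length cs le_rfl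

-- the shared tail of both programs: padding and chunking of the DNA string y
theorem pv_finish (y : List Char) (w : Int) (hw : 1 ≤ w) :
    (pvWrap (y ++ PySem.List.slice
          ((PySem.List.pyRange 0 (-(PySem.Int.floordiv (-(w - PySem.Int.mod (PySem.List.len y) w)) 4)) 1).foldl
            (fun (a : List Char) _ => a ++ ['A', 'T', 'C', 'G']) ['A', 'T', 'C', 'G'])
          (some 0) (some (w - PySem.Int.mod (PySem.List.len y) w))).length
        (y ++ PySem.List.slice
          ((PySem.List.pyRange 0 (-(PySem.Int.floordiv (-(w - PySem.Int.mod (PySem.List.len y) w)) 4)) 1).foldl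
            (fun (a : List Char) _ => a ++ ['A', 'T', 'C', 'G']) ['A', 'T', 'C', 'G'])
          (some 0) (some (w - PySem.Int.mod (PySem.List.len y) w)))
        w.toNat,
      PySem.Int.mod (PySem.List.len y) w)
    = ((PySem.List.pyRange 0
          (PySem.List.len (y ++ PySem.List.slice
            (PySem.List.pyRepeat ['A', 'T', 'C', 'G']
              (PySem.Int.floordiv ((w - PySem.Int.mod (PySem.List.len y) w) + 3) 4 + 1))
            none (some (w - PySem.Int.mod (PySem.List.len y) w)))) w).map
        (fun i => String.ofList (PySem.List.slice
          (y ++ PySem.List.slice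
            (PySem.List.pyRepeat ['A', 'T', 'C', 'G']
              (PySem.Int.floordiv ((w - PySem.Int.mod (PySem.List.len y) w) + 3) 4 + 1))
            none (some (w - PySem.Int.mod (PySem.List.len y) w)))
          (some i) (some (i + w)))),
       PySem.Int.mod (PySem.List.len y) w) := by
  have hp : 1 ≤ w - PySem.Int.mod (PySem.List.len y) w := by
    have := PySem.Int.mod_lt (PySem.List.len y) (show (0:Int) < w by omega)
    omega
  rw [pv_pad_eq _ hp, PySem.List.slice_zero_start, pv_chunks_eq w hw]

-- ===== VERDICT (by name: the statement is the Claim_ definition above) =====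
theorem DNAEncode_spec : Claim_equal_DNAEncode := by
  intro binSeq w hdom hpre
  obtain ⟨hbin0, hw⟩ := hpre
  have hbin : ∀ c ∈ binSeq.toList, c = '0' ∨ c = '1' := fun c hc => by
    simpa using List.all_eq_true.mp hbin0 c hc
  show DNAEncode binSeq w = DNAEncode_alt binSeq w
  simp only [DNAEncode, DNAEncode_alt]
  simp only [PySem.List.len_eq]
  set bs := binSeq.toList with hbs
  set cnt : Int := -PySem.Int.floordiv (-(bs.length : Int)) 3 with hcnt
  have hkcnt : ∀ k : Nat, k < cnt.toNat → 3 * k < bs.length := by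
    intro k hk
    rw [hcnt, PySem.Int.floordiv_eq_ediv_of_pos (by norm_num)] at hk
    omega
  obtain ⟨hdigA, hdigBd⟩ := pv_digits bs hbin (List.range cnt.toNat)
    (fun k hk => hkcnt k (List.mem_range.mp hk))
  -- A's chunk loop
  have hA : List.foldl (fun x1 i => x1 ++
        PySem.Chars.zfill (pvTernary ((PySem.Int.ofCharsBase?
          (PySem.List.slice bs (some (3 * (i + 1) - 3)) (some (3 * (i + 1)))) 2).getD 0)) 2)
        [] (PySem.List.pyRange 0 cnt 1)
      = ((List.range cnt.toNat).flatMap (fun k =>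
          [PySem.Int.floordiv (pvBval bs k) 3, PySem.Int.mod (pvBval bs k) 3])).map digitChar := by
    rw [PySem.List.foldl_append_eq_flatMap (g := fun i =>
        PySem.Chars.zfill (pvTernary ((PySem.Int.ofCharsBase?
          (PySem.List.slice bs (some (3 * (i + 1) - 3)) (some (3 * (i + 1)))) 2).getD 0)) 2),
      List.nil_append, PySem.List.pyRange_one, List.flatMap_map]
    simp only [sub_zero]
    have hpt : ∀ k ∈ List.range cnt.toNat,
        PySem.Chars.zfill (pvTernary ((PySem.Int.ofCharsBase?
          (PySem.List.slice bs (some (3 * ((0 + (k : Int)) + 1) - 3)) (some (3 * ((0 + (k : Int)) + 1)))) 2).getD 0)) 2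
        = PySem.Chars.zfill (pvTernary (pvBval bs k)) 2 := by
      intro k _
      have e1 : (3 * ((0 + (k : Int)) + 1) - 3) = ((3 * k : Nat) : Int) := by push_cast; ring
      have e2 : (3 * ((0 + (k : Int)) + 1)) = ((3 * k + 3 : Nat) : Int) := by push_cast; ring
      rw [e1, e2, PySem.List.slice_natCast]
      have e3 : 3 * k + 3 - 3 * k = 3 := by omega
      rw [e3]
      rfl
    rw [List.flatMap_congr hpt]
    exact hdigA
  -- B's transducer loop, rewritten to run over the chunk indices with pvBval values
  have hB : List.foldl (fun (st : List Char × Bool) pos =>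
        let b := (PySem.Int.ofCharsBase? (PySem.List.slice bs (some pos) (some (pos + 3))) 2).getD 0
        if st.2 then ((PySem.List.pyGetD pvFIRST b "").toList, false)
        else (st.1 ++ (PySem.List.pyGetD
            ((pvSTEP.get? (String.ofList [PySem.List.pyGetD st.1 (-1) 'x'])).getD []) b "").toList,
          false))
        (['A'], true) (PySem.List.pyRange 0 (bs.length : Int) 3)
      = List.foldl (fun (st : List Char × Bool) k =>
          if st.2 then ((PySem.List.pyGetD pvFIRST (pvBval bs k) "").toList, false)
          else (st.1 ++ (PySem.List.pyGetD
              ((pvSTEP.get? (String.ofList [PySem.List.pyGetD st.1 (-1) 'x'])).getD []) (pvBval bs k) "").toList,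
            false))
          (['A'], true) (List.range cnt.toNat) := by
    rw [pv_range3, List.foldl_map]
    refine PySem.List.foldl_congr_mem' _ _ _ _ ?_
    intro k hk st
    have e2 : (((3 * k : Nat) : Int) + 3) = ((3 * k + 3 : Nat) : Int) := by push_cast; ring
    simp only [e2, PySem.List.slice_natCast]
    have e3 : 3 * k + 3 - 3 * k = 3 := by omega
    rw [e3]
    rfl
  rw [hA, hB]
  set dg : List Int := (List.range cnt.toNat).flatMap (fun k =>
      [PySem.Int.floordiv (pvBval bs k) 3, PySem.Int.mod (pvBval bs k) 3]) with hdg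
  -- A's cipher stage: string join of the dict-lookup fold = the running-index fold over dg.tail
  have hy : PySem.Chars.join [] (List.map String.toList
        (List.foldl (fun y1 i => y1 ++
            [(bin2Code (String.ofList [PySem.List.pyGetD (dg.map digitChar) i 'x'])
                (PySem.List.pyGetD y1 (i - 1) "")).getD ""])
          ["A"] (PySem.List.pyRange 1 ((dg.map digitChar).length : Int) 1)))
      = (List.foldl (fun (st : Int × List Char) d =>
            (PySem.Int.mod (st.1 + d + 1) 4,
             st.2 ++ [PySem.List.pyGetD ['A', 'C', 'G', 'T'] (PySem.Int.mod (st.1 + d + 1) 4) 'x']))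
          (0, ['A']) dg.tail).2 := by
    rcases hdgs : dg with _ | ⟨d0, tl⟩
    · rfl
    · have hbounds : ∀ d ∈ tl, 0 ≤ d ∧ d < 3 := by
        intro d hd
        exact hdigBd d (by rw [hdgs]; exact List.mem_cons_of_mem _ hd)
      have hc := pv_cipher tl [d0] 0 ['A'] hbounds (by omega) (by omega) (by simp) (by simp)
        (by rfl)
      simp only [List.cons_append, List.nil_append] at hc
      rw [PySem.List.len_eq] at hc
      have h1 : ((([d0] : List Int).length : Nat) : Int) = 1 := by simp
      rw [h1] at hc
      have h2 : (['A'].map (fun c => String.ofList [c])) = ["A"] := by rfl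
      rw [h2] at hc
      rw [List.tail_cons, hc, List.map_map]
      have h3 : (String.toList ∘ fun c => String.ofList [c]) = fun c => [c] := by
        funext c; simp
      rw [h3, PySem.Chars.join_nil_singletons]
  rw [hy]
  -- B's transducer result equals the same running-index fold over dg.tail
  have hfsm : (List.foldl (fun (st : List Char × Bool) k =>
          if st.2 then ((PySem.List.pyGetD pvFIRST (pvBval bs k) "").toList, false)
          else (st.1 ++ (PySem.List.pyGetD
              ((pvSTEP.get? (String.ofList [PySem.List.pyGetD st.1 (-1) 'x'])).getD []) (pvBval bs k) "").toList,
            false))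
          (['A'], true) (List.range cnt.toNat)).1
      = (List.foldl (fun (st : Int × List Char) d =>
            (PySem.Int.mod (st.1 + d + 1) 4,
             st.2 ++ [PySem.List.pyGetD ['A', 'C', 'G', 'T'] (PySem.Int.mod (st.1 + d + 1) 4) 'x']))
          (0, ['A']) dg.tail).2 := by
    rcases hm : cnt.toNat with _ | m
    · rw [hdg, hm]; rfl
    · rw [hdg, hm, List.range_succ_eq_map, List.foldl_cons, List.flatMap_cons]
      have hb0 := pv_bval_bounds bs hbin 0 (hkcnt 0 (by omega))
      set t0 := PySem.Int.mod (0 + PySem.Int.mod (pvBval bs 0) 3 + 1) 4 with ht0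
      have ht00 : 0 ≤ t0 := PySem.Int.mod_nonneg _ (by omega)
      have ht04 : t0 < 4 := PySem.Int.mod_lt _ (by omega)
      have hfirst : (if (true = true) then ((PySem.List.pyGetD pvFIRST (pvBval bs 0) "").toList, false)
            else ((['A'] : List Char) ++ (PySem.List.pyGetD
                ((pvSTEP.get? (String.ofList [PySem.List.pyGetD (['A'] : List Char) (-1) 'x'])).getD [])
                (pvBval bs 0) "").toList, false))
          = ((['A', baseChar t0] : List Char), false) := by
        rw [if_pos rfl, pv_first_table (pvBval bs 0) hb0.1 hb0.2, ← ht0]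
      rw [hfirst]
      have htail : ([PySem.Int.floordiv (pvBval bs 0) 3, PySem.Int.mod (pvBval bs 0) 3]
            ++ (List.map Nat.succ (List.range m)).flatMap (fun k =>
                [PySem.Int.floordiv (pvBval bs k) 3, PySem.Int.mod (pvBval bs k) 3])).tail
          = PySem.Int.mod (pvBval bs 0) 3
            :: (List.map Nat.succ (List.range m)).flatMap (fun k =>
                [PySem.Int.floordiv (pvBval bs k) 3, PySem.Int.mod (pvBval bs k) 3]) := rfl
      rw [htail, List.foldl_cons]
      have hstep0 : (PySem.Int.mod (0 + PySem.Int.mod (pvBval bs 0) 3 + 1) 4,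
            (['A'] : List Char) ++ [PySem.List.pyGetD ['A', 'C', 'G', 'T']
              (PySem.Int.mod (0 + PySem.Int.mod (pvBval bs 0) 3 + 1) 4) 'x'])
          = (t0, (['A', baseChar t0] : List Char)) := by
        rw [← ht0, pv_bases_at t0 ht00 ht04]
        rfl
      rw [hstep0]
      have hres := pv_fsm_tail (pvBval bs) (List.map Nat.succ (List.range m)) t0 ['A', baseChar t0]
        (by
          intro j hj
          rcases List.mem_map.mp hj with ⟨i, hi, rfl⟩
          exact pv_bval_bounds bs hbin _ (hkcnt _ (by
            have := List.mem_range.mp hi; omega)))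
        ht00 ht04
        (by
          rw [show (['A', baseChar t0] : List Char) = ['A'] ++ [baseChar t0] by rfl]
          exact List.getLast?_concat)
      rw [hres]
  rw [hfsm]
  exact pv_finish _ w hw
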